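-- pv_equiv track=rewrite | github.com/fact-project/rain_and_wind_auto_park | check_methods.py | intervals
-- ===== SOURCE A (Python) =====
-- def intervals(data):
--     list_of_intervals = []
--     true = 0
--     trues = []
--     false = 0
--     falses = []
--     for rain in data['rains5']:
--         if rain == False:
--             false += 1
--             if true != 0:
--                 list_of_intervals.append(true)
--             true = 0
--         else:
--             true += 1
--             if false != 0:
--                 list_of_intervals.append(false)
--             false = 0
--         falses.append(false)
--         trues.append(true)
--     return list_of_intervals, falses, trues
-- ===== SOURCE B (Python) =====
-- def intervals(data):
--     # Run-length decomposition: build the runs of data['rains5'] once, then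
--     # derive interval lengths (all runs but the last) and the per-position
--     # counters from the runs.
--     runs = []  # list of [key, length], key = (rain == False)
--     for rain in data['rains5']:
--         k = (rain == False)
--         if runs and runs[-1][0] == k:
--             runs[-1][1] += 1
--         else:
--             runs.append([k, 1])
--     list_of_intervals = [length for _, length in runs[:-1]]
--     falses = []
--     trues = []
--     for k, length in runs:
--         if k:
--             falses.extend(range(1, length + 1))
--             trues.extend([0] * length)
--         else:
--             trues.extend(range(1, length + 1))
--             falses.extend([0] * length)
--     return list_of_intervals, falses, trues
-- ===== Notes on version B (the rewrite author's own statement) =====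
-- stated objective: alternative
-- what changed: Replaces A's five simultaneously-updated running counters with a one-pass run-length decomposition of data['rains5'], from which the interval list (all runs but the last) and the two per-position counter lists are derived.
import Mathlib
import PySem

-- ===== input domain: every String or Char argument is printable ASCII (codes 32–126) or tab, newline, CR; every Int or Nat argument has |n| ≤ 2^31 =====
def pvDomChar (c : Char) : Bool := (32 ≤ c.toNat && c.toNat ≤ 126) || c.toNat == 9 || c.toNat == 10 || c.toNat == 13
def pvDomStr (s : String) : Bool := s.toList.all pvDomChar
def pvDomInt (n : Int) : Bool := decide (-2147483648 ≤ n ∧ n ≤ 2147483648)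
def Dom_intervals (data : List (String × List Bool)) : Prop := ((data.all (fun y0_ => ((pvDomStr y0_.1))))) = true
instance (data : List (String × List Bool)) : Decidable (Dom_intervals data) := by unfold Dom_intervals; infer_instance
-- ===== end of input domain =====

-- B replaces A's five running counters by a one-pass run-length decomposition of the
-- sequence, deriving the three outputs from the list of runs (objective: alternative).

-- ===== PORT A =====
-- state = (list_of_intervals, true, trues, false, falses)
def stepA (st : List Int × Int × List Int × Int × List Int) (rain : Bool) :
    List Int × Int × List Int × Int × List Int :=
  let (loi, t, ts, f, fs) := st
  if rain == false then
    let f' := f + 1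
    let loi' := if t ≠ 0 then loi ++ [t] else loi
    (loi', 0, ts ++ [0], f', fs ++ [f'])
  else
    let t' := t + 1
    let loi' := if f ≠ 0 then loi ++ [f] else loi
    (loi', t', ts ++ [t'], 0, fs ++ [0])

def intervals (data : List (String × List Bool)) : List Int × List Int × List Int :=
  match data.lookup "rains5" with
  | none => ([], [], [])   -- Python raises KeyError here; excluded by Pre_intervals
  | some rains =>
    let st := rains.foldl stepA ([], 0, [], 0, [])
    (st.1, st.2.2.2.2, st.2.2.1)

-- ===== PORT B =====
-- extend the run list by one element with key k (= rain == False)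
def addRun : List (Bool × Int) → Bool → List (Bool × Int)
  | [], k => [(k, 1)]
  | (j, L) :: rest, k =>
    match rest with
    | [] => if j == k then [(j, L + 1)] else [(j, L), (k, 1)]
    | _ :: _ => (j, L) :: addRun rest k

-- one run's contribution to (falses, trues)
def runStep (acc : List Int × List Int) (r : Bool × Int) : List Int × List Int :=
  let (fs, ts) := acc
  if r.1 then
    (fs ++ PySem.List.pyRange 1 (r.2 + 1) 1, ts ++ List.replicate r.2.toNat 0)
  else
    (fs ++ List.replicate r.2.toNat 0, ts ++ PySem.List.pyRange 1 (r.2 + 1) 1)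

def intervals_alt (data : List (String × List Bool)) : List Int × List Int × List Int :=
  match data.lookup "rains5" with
  | none => ([], [], [])
  | some seq =>
    let runs := seq.foldl (fun rs x => addRun rs (x == false)) []
    let loi := runs.dropLast.map Prod.snd
    let p := runs.foldl runStep ([], [])
    (loi, p.1, p.2)

-- ===== PRECONDITION & SPEC =====
-- Pre_ excludes exactly the inputs without a "rains5" key, on which A raises KeyError.
def Pre_intervals (data : List (String × List Bool)) : Prop :=
  (data.lookup "rains5").isSome = true

instance (data : List (String × List Bool)) : Decidable (Pre_intervals data) := by
  unfold Pre_intervals; infer_instance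

def pvWitness_intervals : (List (String × List Bool)) :=
  [("rains5", [false, true, true, false])]

def Spec_intervals (data : List (String × List Bool)) (out : List Int × List Int × List Int) : Prop := out = intervals_alt data
instance (data : List (String × List Bool)) (out : List Int × List Int × List Int) : Decidable (Spec_intervals data out) := by unfold Spec_intervals; infer_instance

-- ===== CLAIM (what is proved, stated in full; the proofs are below) =====
def Claim_equal_intervals : Prop := ∀ (data : List (String × List Bool)), Dom_intervals data → Pre_intervals data → Spec_intervals data (intervals data)

-- ===== LEMMAS AND PROOFS =====

-- last-run counters encoded in the run list
def tOf (rs : List (Bool × Int)) : Int :=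
  match rs.getLast? with
  | some (false, L) => L
  | _ => 0

def fOf (rs : List (Bool × Int)) : Int :=
  match rs.getLast? with
  | some (true, L) => L
  | _ => 0

lemma pyRange_one_two : PySem.List.pyRange 1 2 1 = [1] := by decide

lemma addRun_cons_of_ne (j : Bool) (L : Int) (rest : List (Bool × Int)) (k : Bool)
    (h : rest ≠ []) : addRun ((j, L) :: rest) k = (j, L) :: addRun rest k := by
  cases rest with
  | nil => simp at h
  | cons b bs => rfl

lemma addRun_concat (rs : List (Bool × Int)) (r : Bool × Int) (k : Bool) :
    addRun (rs ++ [r]) k =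
      rs ++ (if r.1 == k then [(r.1, r.2 + 1)] else [r, (k, 1)]) := by
  induction rs with
  | nil => obtain ⟨j, L⟩ := r; simp [addRun]
  | cons a rs ih =>
      obtain ⟨j, L⟩ := a
      rw [List.cons_append, addRun_cons_of_ne _ _ _ _ (by simp), ih, List.cons_append]

lemma addRun_concat_same (rs : List (Bool × Int)) (j : Bool) (L : Int) :
    addRun (rs ++ [(j, L)]) j = rs ++ [(j, L + 1)] := by
  rw [addRun_concat]; simp

lemma addRun_concat_diff (rs : List (Bool × Int)) (j : Bool) (L : Int) (k : Bool)
    (h : j ≠ k) : addRun (rs ++ [(j, L)]) k = rs ++ [(j, L), (k, 1)] := by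
  rw [addRun_concat]; simp [h]

lemma runStep_succ (acc : List Int × List Int) (j : Bool) (L : Int) (hL : 0 ≤ L) :
    runStep acc (j, L + 1) =
      ((runStep acc (j, L)).1 ++ (if j then [L + 1] else [0]),
       (runStep acc (j, L)).2 ++ (if j then [0] else [L + 1])) := by
  obtain ⟨fs, ts⟩ := acc
  have h1 : PySem.List.pyRange 1 (L + 1 + 1) 1 = PySem.List.pyRange 1 (L + 1) 1 ++ [L + 1] :=
    PySem.List.pyRange_one_succ_right (by omega)
  have h2 : (L + 1).toNat = L.toNat + 1 := by omega
  cases j <;>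
    simp [runStep, h1, h2, List.replicate_succ', List.append_assoc]

lemma fold_concat_succ (rs : List (Bool × Int)) (j : Bool) (L : Int) (hL : 0 ≤ L) :
    (rs ++ [(j, L + 1)]).foldl runStep ([], []) =
      (((rs ++ [(j, L)]).foldl runStep ([], [])).1 ++ (if j then [L + 1] else [0]),
       ((rs ++ [(j, L)]).foldl runStep ([], [])).2 ++ (if j then [0] else [L + 1])) := by
  rw [List.foldl_append, List.foldl_append]
  simp only [List.foldl_cons, List.foldl_nil]
  exact runStep_succ _ j L hL

lemma fold_concat_one (rs : List (Bool × Int)) (k : Bool) :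
    (rs ++ [(k, 1)]).foldl runStep ([], []) =
      ((rs.foldl runStep ([], [])).1 ++ (if k then [1] else [0]),
       (rs.foldl runStep ([], [])).2 ++ (if k then [0] else [1])) := by
  rw [List.foldl_append]
  simp only [List.foldl_cons, List.foldl_nil]
  obtain ⟨fs, ts⟩ := rs.foldl runStep ([], [])
  cases k <;> simp [runStep, pyRange_one_two]

lemma fold_pair_one (rs : List (Bool × Int)) (a : Bool × Int) (k : Bool) :
    (rs ++ [a, (k, 1)]).foldl runStep ([], []) =
      (((rs ++ [a]).foldl runStep ([], [])).1 ++ (if k then [1] else [0]),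
       ((rs ++ [a]).foldl runStep ([], [])).2 ++ (if k then [0] else [1])) := by
  rw [show rs ++ [a, (k, 1)] = (rs ++ [a]) ++ [(k, 1)] by simp, fold_concat_one]

lemma tOf_concat (rs : List (Bool × Int)) (j : Bool) (L : Int) :
    tOf (rs ++ [(j, L)]) = if j then 0 else L := by
  cases j <;> simp [tOf]

lemma fOf_concat (rs : List (Bool × Int)) (j : Bool) (L : Int) :
    fOf (rs ++ [(j, L)]) = if j then L else 0 := by
  cases j <;> simp [fOf]

lemma tOf_pair (rs : List (Bool × Int)) (a : Bool × Int) (k : Bool) (n : Int) :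
    tOf (rs ++ [a, (k, n)]) = if k then 0 else n := by
  cases k <;> simp [tOf]

lemma fOf_pair (rs : List (Bool × Int)) (a : Bool × Int) (k : Bool) (n : Int) :
    fOf (rs ++ [a, (k, n)]) = if k then n else 0 := by
  cases k <;> simp [fOf]

lemma addRun_pos (rs : List (Bool × Int)) (k : Bool) (hpos : ∀ r ∈ rs, 1 ≤ r.2) :
    ∀ r ∈ addRun rs k, 1 ≤ r.2 := by
  induction rs using List.reverseRecOn with
  | nil =>
      intro r hr
      simp [addRun] at hr
      subst hr; norm_num
  | append_singleton rs a _ =>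
      intro r hr
      obtain ⟨rb, rl⟩ := r
      obtain ⟨ab, al⟩ := a
      have ha : 1 ≤ al := hpos (ab, al) (by simp)
      rw [addRun_concat] at hr
      rcases List.mem_append.mp hr with h1 | h1
      · exact hpos _ (by simp [h1])
      · split_ifs at h1 with hk
        · simp only [List.mem_singleton, Prod.mk.injEq] at h1
          simpa using by omega
        · simp only [List.mem_cons, Prod.mk.injEq,
            List.not_mem_nil, or_false] at h1
          rcases h1 with ⟨_, h⟩ | ⟨_, h⟩ <;> simp <;> omega

lemma step_eq (rs : List (Bool × Int)) (x : Bool) (hpos : ∀ r ∈ rs, 1 ≤ r.2) :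
    stepA (rs.dropLast.map Prod.snd, tOf rs, (rs.foldl runStep ([], [])).2, fOf rs,
        (rs.foldl runStep ([], [])).1) x =
      ((addRun rs (x == false)).dropLast.map Prod.snd, tOf (addRun rs (x == false)),
       ((addRun rs (x == false)).foldl runStep ([], [])).2, fOf (addRun rs (x == false)),
       ((addRun rs (x == false)).foldl runStep ([], [])).1) := by
  induction rs using List.reverseRecOn with
  | nil =>
      cases x <;>
        simp [stepA, addRun, tOf, fOf, runStep, pyRange_one_two]
  | append_singleton rs r _ =>
      obtain ⟨j, L⟩ := r
      have hL : 1 ≤ L := hpos (j, L) (by simp)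
      have hL' : L ≠ 0 := by omega
      rcases x with _ | _ <;> rcases j with _ | _
      · -- x = false (k = true), j = false: key changes
        simp only [show ((false : Bool) == false) = true from rfl]
        rw [addRun_concat_diff rs false L true (by simp), fold_pair_one]
        simp [stepA, tOf_concat, fOf_concat, tOf_pair, fOf_pair, hL']
      · -- x = false (k = true), j = true: run extends
        simp only [show ((false : Bool) == false) = true from rfl]
        rw [addRun_concat_same, fold_concat_succ rs true L (by omega)]
        simp [stepA, tOf_concat, fOf_concat]
      · -- x = true (k = false), j = false: run extends
        simp only [show ((true : Bool) == false) = false from rfl]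
        rw [addRun_concat_same, fold_concat_succ rs false L (by omega)]
        simp [stepA, tOf_concat, fOf_concat]
      · -- x = true (k = false), j = true: key changes
        simp only [show ((true : Bool) == false) = false from rfl]
        rw [addRun_concat_diff rs true L false (by simp), fold_pair_one]
        simp [stepA, tOf_concat, fOf_concat, tOf_pair, fOf_pair, hL']

lemma fold_eq (xs : List Bool) (rs : List (Bool × Int))
    (hpos : ∀ r ∈ rs, 1 ≤ r.2) :
    xs.foldl stepA (rs.dropLast.map Prod.snd, tOf rs, (rs.foldl runStep ([], [])).2, fOf rs,
        (rs.foldl runStep ([], [])).1) =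
      (let rs' := xs.foldl (fun rs x => addRun rs (x == false)) rs
       (rs'.dropLast.map Prod.snd, tOf rs', (rs'.foldl runStep ([], [])).2, fOf rs',
        (rs'.foldl runStep ([], [])).1)) := by
  induction xs generalizing rs with
  | nil => rfl
  | cons x xs ih =>
      simp only [List.foldl_cons]
      rw [step_eq rs x hpos]
      exact ih _ (addRun_pos rs _ hpos)

-- ===== VERDICT (by name: the statement is the Claim_ definition above) =====
theorem intervals_spec : Claim_equal_intervals := by
  intro data _ hpre
  unfold Spec_intervals intervals intervals_alt
  cases hl : data.lookup "rains5" with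
  | none => unfold Pre_intervals at hpre; rw [hl] at hpre
  | some seq =>
      have h0 : ∀ r ∈ ([] : List (Bool × Int)), 1 ≤ r.2 := by intro r hr; simp at hr
      have h := fold_eq seq [] h0
      simp only [List.dropLast_nil, List.map_nil, List.foldl_nil] at h
      simp only [tOf, fOf, List.getLast?_nil] at h
      simp only [h]
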